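-- pv_equiv track=rewrite | github.com/MaterializeInc/materialize | scripts/skill_upgrade.py | add_section_summaries
-- ===== SOURCE A (Python) =====
-- def add_section_summaries(content: str) -> str:
--     """Add brief summaries after H2 headings that lack them."""
--     lines = content.split('\n')
--     result = []
--     i = 0
--
--     while i < len(lines):
--         line = lines[i]
--         result.append(line)
--
--         # Check if this is an H2 heading
--         if line.startswith('## ') and not line.startswith('## Purpose') and not line.startswith('## When'):
--             # Check if next non-empty line is content or another heading/code
--             j = i + 1
--             while j < len(lines) and not lines[j].strip():
--                 result.append(lines[j])
--                 j += 1
--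
--             if j < len(lines):
--                 next_line = lines[j].strip()
--                 # If next content is a code block, table, or heading, add a summary placeholder
--                 if next_line.startswith('```') or next_line.startswith('|') or next_line.startswith('#'):
--                     heading_text = line[3:].strip()
--                     result.append(f"This section covers {heading_text.lower()}.")
--                     result.append("")
--
--             i = j - 1  # Will be incremented at end of loop
--
--         i += 1
--
--     return '\n'.join(result)
-- ===== SOURCE B (Python) =====
-- def add_section_summaries(content: str) -> str:
--     """Add brief summaries after H2 headings that lack them (single pass with a pending-heading state)."""
--     out = []
--     pending = None  # stripped text of a qualifying H2 heading awaiting its first non-blank line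
--
--     for line in content.split('\n'):
--         if pending is not None and not line.strip():
--             out.append(line)
--             continue
--         if pending is not None:
--             if line.strip().startswith(('```', '|', '#')):
--                 out.append(f"This section covers {pending.lower()}.")
--                 out.append("")
--             pending = None
--         out.append(line)
--         if line.startswith('## ') and not line.startswith('## Purpose') and not line.startswith('## When'):
--             pending = line[3:].strip()
--
--     return '\n'.join(out)
-- ===== Notes on version B (the rewrite author's own statement) =====
-- stated objective: simpler
-- what changed: Replaced A's index-based outer while loop with an inner blank-skipping lookahead and the i = j - 1 rewind by a single forward for-loop over the lines that carries a `pending` heading state and resolves it at the first non-blank line.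
import Mathlib
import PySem

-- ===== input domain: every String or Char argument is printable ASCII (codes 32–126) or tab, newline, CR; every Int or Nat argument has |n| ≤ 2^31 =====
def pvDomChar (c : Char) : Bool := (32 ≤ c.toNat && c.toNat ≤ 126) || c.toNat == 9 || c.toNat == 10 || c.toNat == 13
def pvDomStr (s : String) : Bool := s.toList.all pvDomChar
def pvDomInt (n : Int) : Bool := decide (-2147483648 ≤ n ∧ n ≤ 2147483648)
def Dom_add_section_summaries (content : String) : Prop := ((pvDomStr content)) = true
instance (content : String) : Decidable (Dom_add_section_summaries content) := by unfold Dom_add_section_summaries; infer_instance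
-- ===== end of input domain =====

-- B replaces A's index-lookahead/rewind (inner blank-skipping while loop plus i = j - 1 rewind)
-- by a single forward pass keeping a `pending` heading state; objective: simpler, same output.

-- ===== PORT A =====

-- straight transliterations of elementary Python expressions both sources contain
def pvIsHead (line : String) : Bool :=
  PySem.Str.startswith line "## " && !PySem.Str.startswith line "## Purpose" && !PySem.Str.startswith line "## When"

def pvStartsAny (next_line : String) : Bool :=
  PySem.Str.startswith next_line "```" || PySem.Str.startswith next_line "|" || PySem.Str.startswith next_line "#"

-- f"This section covers {heading_text.lower()}." with heading_text = line[3:].strip()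
def pvSummary (headingText : String) : String :=
  "This section covers " ++ PySem.Str.lower headingText ++ "."

def pvHeadText (line : String) : String :=
  PySem.Str.strip (PySem.Str.slice line (some 3) none)

-- content.split('\n')  (separator non-empty, so split? is always `some`)
def pvLines (content : String) : List String :=
  (PySem.Str.split? content "\n").getD []

-- inner while: while j < len(lines) and not lines[j].strip(): result.append(lines[j]); j += 1
-- (`fuel` is only a structural totality guard; fuel = lines.length always suffices, j advances each step)
def pvSkipBlanks (lines : List String) (fuel : Nat) (j : Nat) (result : List String) : Nat × List String :=
  match fuel with
  | 0 => (j, result)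
  | fuel + 1 =>
    if j < lines.length ∧ PySem.Str.strip lines[j]! = "" then
      pvSkipBlanks lines fuel (j + 1) (result ++ [lines[j]!])
    else
      (j, result)

-- outer while loop of A (after a heading, i = j - 1; i += 1, i.e. i jumps to j);
-- `fuel` again only guards totality: i strictly increases, so lines.length + 1 - i steps suffice
def pvALoop (lines : List String) (fuel : Nat) (i : Nat) (result : List String) : List String :=
  match fuel with
  | 0 => result
  | fuel + 1 =>
    if i < lines.length then
      let line := lines[i]!
      let result1 := result ++ [line]
      if pvIsHead line then
        let jr := pvSkipBlanks lines lines.length (i + 1) result1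
        let result2 :=
          if jr.1 < lines.length then
            if pvStartsAny (PySem.Str.strip lines[jr.1]!) then
              jr.2 ++ [pvSummary (pvHeadText line), ""]
            else jr.2
          else jr.2
        pvALoop lines fuel jr.1 result2
      else
        pvALoop lines fuel (i + 1) result1
    else
      result

def add_section_summaries (content : String) : String :=
  PySem.Str.join "\n" (pvALoop (pvLines content) ((pvLines content).length + 1) 0 [])

-- ===== PORT B =====

-- one step of B's forward pass; state = (out, pending)
def pvBStep (st : List String × Option String) (line : String) : List String × Option String :=
  match st with
  | (out, some p) =>
    if PySem.Str.strip line = "" then (out ++ [line], some p)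
    else
      let out1 := if pvStartsAny (PySem.Str.strip line) then out ++ [pvSummary p, ""] else out
      let out2 := out1 ++ [line]
      (out2, if pvIsHead line then some (pvHeadText line) else none)
  | (out, none) =>
    (out ++ [line], if pvIsHead line then some (pvHeadText line) else none)

def add_section_summaries_alt (content : String) : String :=
  PySem.Str.join "\n" ((pvLines content).foldl pvBStep ([], none)).1

-- ===== PRECONDITION & SPEC =====
def Spec_add_section_summaries (content : String) (out : String) : Prop := out = add_section_summaries_alt content
instance (content : String) (out : String) : Decidable (Spec_add_section_summaries content out) := by unfold Spec_add_section_summaries; infer_instance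

-- ===== CLAIM (what is proved, stated in full; the proofs are below) =====
def Claim_equal_add_section_summaries : Prop := ∀ (content : String), Dom_add_section_summaries content → Spec_add_section_summaries content (add_section_summaries content)

-- ===== LEMMAS AND PROOFS =====

-- the fuel of pvSkipBlanks is irrelevant once it covers the remaining lines
theorem pvSkipBlanks_fuel (lines : List String) :
    ∀ (f1 f2 j : Nat), lines.length - j ≤ f1 → lines.length - j ≤ f2 → ∀ result,
      pvSkipBlanks lines f1 j result = pvSkipBlanks lines f2 j result := by
  intro f1
  induction f1 with
  | zero =>
    intro f2 j h1 h2 result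
    match f2 with
    | 0 => rfl
    | f2 + 1 =>
      simp only [pvSkipBlanks]
      rw [if_neg (by omega)]
  | succ f1 ih =>
    intro f2 j h1 h2 result
    match f2 with
    | 0 =>
      simp only [pvSkipBlanks]
      rw [if_neg (by omega)]
    | f2 + 1 =>
      simp only [pvSkipBlanks]
      by_cases hc : j < lines.length ∧ PySem.Str.strip lines[j]! = ""
      · rw [if_pos hc, if_pos hc]
        exact ih f2 (j + 1) (by omega) (by omega) _
      · rw [if_neg hc, if_neg hc]

theorem pvSkipBlanks_ge (lines : List String) :
    ∀ (fuel j : Nat) (result : List String), j ≤ (pvSkipBlanks lines fuel j result).1 := by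
  intro fuel
  induction fuel with
  | zero => intro j result; simp [pvSkipBlanks]
  | succ fuel ih =>
    intro j result
    simp only [pvSkipBlanks]
    by_cases hc : j < lines.length ∧ PySem.Str.strip lines[j]! = ""
    · rw [if_pos hc]
      have := ih (j + 1) (result ++ [lines[j]!])
      omega
    · rw [if_neg hc]

theorem pvSkipBlanks_stop (lines : List String) (fuel j : Nat) (result : List String)
    (h : ¬ (j < lines.length ∧ PySem.Str.strip lines[j]! = "")) :
    pvSkipBlanks lines fuel j result = (j, result) := by
  match fuel with
  | 0 => rfl
  | fuel + 1 => simp only [pvSkipBlanks]; rw [if_neg h]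

-- the joint loop invariant: with no pending heading B's fold from position i IS A's outer loop
-- (for any sufficient fuel); with a pending heading p, B's fold replays A's blank-skip and then
-- A's summary resolution
theorem pv_main (n : Nat) : ∀ (lines : List String) (i : Nat), lines.length - i = n → ∀ (result : List String),
    (∀ fuel : Nat, n < fuel →
      pvALoop lines fuel i result = ((lines.drop i).foldl pvBStep (result, none)).1) ∧
    (∀ p : String,
      ((lines.drop i).foldl pvBStep (result, some p)).1 =
        (let jr := pvSkipBlanks lines lines.length i result
         if jr.1 < lines.length then
           if pvStartsAny (PySem.Str.strip lines[jr.1]!) then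
             pvALoop lines (lines.length + 1) jr.1 (jr.2 ++ [pvSummary p, ""])
           else
             pvALoop lines (lines.length + 1) jr.1 jr.2
         else jr.2)) := by
  induction n using Nat.strong_induction_on with
  | _ n ih =>
    intro lines i hn result
    by_cases hi : i < lines.length
    · have hdrop : lines.drop i = lines[i]! :: lines.drop (i + 1) := by
        rw [List.drop_eq_getElem_cons hi]
        congr 1
        simp [List.getElem!_eq_getElem?_getD, List.getElem?_eq_getElem hi]
      have ihn : lines.length - (i + 1) < n := by omega
      -- part (1), for every start state: pending = none
      have P1 : ∀ (res : List String) (fuel : Nat), n < fuel →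
          pvALoop lines fuel i res = ((lines.drop i).foldl pvBStep (res, none)).1 := by
        intro res fuel hfuel
        match fuel with
        | fuel + 1 =>
        simp only [pvALoop]
        rw [if_pos hi, hdrop]
        simp only [List.foldl_cons, pvBStep]
        by_cases hh : pvIsHead lines[i]!
        · rw [if_pos hh, if_pos hh]
          have h2 := (ih _ ihn lines (i + 1) rfl (res ++ [lines[i]!])).2 (pvHeadText lines[i]!)
          rw [h2]
          simp only []
          set jr := pvSkipBlanks lines lines.length (i + 1) (res ++ [lines[i]!]) with hjr
          have hge : i + 1 ≤ jr.1 := hjr ▸ pvSkipBlanks_ge lines lines.length (i + 1) _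
          have hlt : lines.length - jr.1 < n := by omega
          by_cases hjl : jr.1 < lines.length
          · simp only [if_pos hjl]
            rw [apply_ite (pvALoop lines fuel jr.1)]
            have e1 := (ih _ hlt lines jr.1 rfl (jr.2 ++ [pvSummary (pvHeadText lines[i]!), ""])).1
            have e2 := (ih _ hlt lines jr.1 rfl jr.2).1
            rw [e1 fuel (by omega), e1 (lines.length + 1) (by omega),
                e2 fuel (by omega), e2 (lines.length + 1) (by omega)]
          · simp only [if_neg hjl]
            match fuel with
            | 0 => rfl
            | fuel + 1 => simp only [pvALoop]; rw [if_neg hjl]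
        · rw [if_neg hh, if_neg hh]
          exact (ih _ ihn lines (i + 1) rfl (res ++ [lines[i]!])).1 fuel (by omega)
      refine ⟨fun fuel hf => P1 result fuel hf, ?_⟩
      -- part (2): pending = some p
      intro p
      rw [hdrop]
      simp only [List.foldl_cons, pvBStep]
      by_cases hb : PySem.Str.strip lines[i]! = ""
      · -- blank line: both append it and keep skipping
        rw [if_pos hb]
        have h2 := (ih _ ihn lines (i + 1) rfl (result ++ [lines[i]!])).2 p
        rw [h2]
        have hskip : pvSkipBlanks lines lines.length i result
            = pvSkipBlanks lines lines.length (i + 1) (result ++ [lines[i]!]) := by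
          obtain ⟨L, hL⟩ : ∃ L, lines.length = L + 1 := ⟨lines.length - 1, by omega⟩
          conv_lhs => rw [hL]
          simp only [pvSkipBlanks]
          rw [if_pos ⟨hi, hb⟩]
          exact pvSkipBlanks_fuel lines L lines.length (i + 1) (by omega) (by omega) _
        rw [hskip]
      · -- first non-blank line: the pending heading is resolved here, and the
        -- resolving line is then re-processed exactly as A's outer loop processes line i
        rw [if_neg hb]
        have hskip : pvSkipBlanks lines lines.length i result = (i, result) :=
          pvSkipBlanks_stop lines _ i result (by tauto)
        rw [hskip]
        simp only [if_pos hi]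
        have key : ∀ res : List String,
            ((lines.drop (i + 1)).foldl pvBStep (pvBStep (res, none) lines[i]!)).1
              = pvALoop lines (lines.length + 1) i res := by
          intro res
          have h1 := P1 res (lines.length + 1) (by omega)
          rw [hdrop, List.foldl_cons] at h1
          exact h1.symm
        by_cases hc : pvStartsAny (PySem.Str.strip lines[i]!)
        · rw [if_pos hc, if_pos hc]
          have hk := key (result ++ [pvSummary p, ""])
          simp only [pvBStep] at hk
          exact hk
        · rw [if_neg hc, if_neg hc]
          have hk := key result
          simp only [pvBStep] at hk
          exact hk
    · -- i ≥ length: both loops are finished and return `result`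
      have hdrop : lines.drop i = ([] : List String) := List.drop_eq_nil_of_le (by omega)
      refine ⟨?_, ?_⟩
      · intro fuel hfuel
        rw [hdrop]
        match fuel with
        | fuel + 1 =>
          simp only [pvALoop]
          rw [if_neg hi]
          simp
      · intro p
        rw [hdrop]
        have hskip : pvSkipBlanks lines lines.length i result = (i, result) :=
          pvSkipBlanks_stop lines _ i result (by tauto)
        simp [hskip, hi]

-- ===== VERDICT (by name: the statement is the Claim_ definition above) =====
theorem add_section_summaries_spec : Claim_equal_add_section_summaries := by
  intro content _
  unfold Spec_add_section_summaries add_section_summaries add_section_summaries_alt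
  have h := ((pv_main (pvLines content).length (pvLines content) 0 (by omega) []).1
    ((pvLines content).length + 1) (by omega))
  rw [List.drop_zero] at h
  rw [h]
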